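-- pv_equiv track=rewrite | github.com/hanzohasashi33/Competetive_programming | Camp-Summer-Training/week1/5/week1_5.py | evenness
-- ===== SOURCE A (Python) =====
-- def evenness(l,n) :
--     x,y = 0,0
--     count_even = 0
--     count_odd = 0
--     for i in range(n) :
--         if l[i]%2 == 0 :
--             count_even += 1
--             x = i
--         else :
--             count_odd += 1
--             y = i
--     if count_odd == 1 :
--         return y + 1
--     else :
--         return x + 1
-- ===== SOURCE B (Python) =====
-- def evenness(l, n):
--     odd_count = sum(1 for i in range(n) if l[i] % 2 != 0)
--     if odd_count == 1:
--         return next(i for i in range(n) if l[i] % 2 != 0) + 1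
--     for i in range(n - 1, -1, -1):
--         if l[i] % 2 == 0:
--             return i + 1
--     return 1
-- ===== Notes on version B (the rewrite author's own statement) =====
-- stated objective: alternative
-- what changed: Replaces A's single forward pass that maintains four accumulators (parity counts and last-seen positions) with count-then-search: count odds, then either a forward early-exit search for the lone odd index or a backward early-exit scan from n-1 for the last even index; B never tracks last-seen state.
import Mathlib
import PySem

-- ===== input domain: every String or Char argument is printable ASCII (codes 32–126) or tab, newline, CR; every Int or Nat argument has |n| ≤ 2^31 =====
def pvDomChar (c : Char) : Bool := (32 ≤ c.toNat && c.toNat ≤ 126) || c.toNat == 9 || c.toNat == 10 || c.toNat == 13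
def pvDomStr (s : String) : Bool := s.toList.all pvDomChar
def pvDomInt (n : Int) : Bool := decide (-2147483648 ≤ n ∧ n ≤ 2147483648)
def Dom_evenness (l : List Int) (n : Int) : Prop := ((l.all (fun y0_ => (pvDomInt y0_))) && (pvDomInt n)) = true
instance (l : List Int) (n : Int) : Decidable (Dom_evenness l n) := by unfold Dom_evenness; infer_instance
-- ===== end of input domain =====

-- B replaces A's counter-plus-last-position forward scan with count-then-search: count odds, then a forward search for the lone odd or a backward early-exit scan for the last even (alternative decomposition, same cost).


-- ===== PORT A =====
-- l[i]%2 == 0 (Python %: PySem.Int.mod); l[i] is in range inside Pre_, .getD 0 is never reached there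
def evenA (l : List Int) (i : Int) : Bool :=
  PySem.Int.mod ((PySem.List.pyGet? l i).getD 0) 2 == 0

def stepA (l : List Int) (st : Int × Int × Int × Int) (i : Int) : Int × Int × Int × Int :=
  if evenA l i then (i, st.2.1, st.2.2.1 + 1, st.2.2.2)
  else (st.1, i, st.2.2.1, st.2.2.2 + 1)

def evenness (l : List Int) (n : Int) : Int :=
  let st := (PySem.List.pyRange 0 n 1).foldl (stepA l) (0, 0, 0, 0)
  if st.2.2.2 == 1 then st.2.1 + 1 else st.1 + 1

-- ===== PORT B =====
-- l[i] % 2 != 0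
def oddB (l : List Int) (i : Int) : Bool :=
  PySem.Int.mod ((PySem.List.pyGet? l i).getD 0) 2 != 0

def evenness_alt (l : List Int) (n : Int) : Int :=
  -- odd_count = sum(1 for i in range(n) if l[i] % 2 != 0)
  let oddCount : Int := ((PySem.List.pyRange 0 n 1).countP (oddB l) : Int)
  if oddCount == 1 then
    -- next(i for i in range(n) if l[i] % 2 != 0) + 1 ; next cannot fail since oddCount == 1
    ((PySem.List.pyRange 0 n 1).find? (oddB l)).getD 0 + 1
  else
    -- backward early-exit scan: for i in range(n-1, -1, -1): if l[i] % 2 == 0: return i+1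
    match (PySem.List.pyRange (n - 1) (-1) (-1)).find? (fun i => !(oddB l i)) with
    | some i => i + 1
    | none => 1

-- ===== PRECONDITION & SPEC =====
-- A indexes l[i] for every i in range(n): it raises IndexError iff n > len(l)
def Pre_evenness (l : List Int) (n : Int) : Prop := n ≤ (l.length : Int)
instance (l : List Int) (n : Int) : Decidable (Pre_evenness l n) := by unfold Pre_evenness; infer_instance
def pvWitness_evenness : List Int × Int := ([2, 3, 4], 3)
def Spec_evenness (l : List Int) (n : Int) (out : Int) : Prop := out = evenness_alt l n
instance (l : List Int) (n : Int) (out : Int) : Decidable (Spec_evenness l n out) := by unfold Spec_evenness; infer_instance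

-- ===== CLAIM (what is proved, stated in full; the proofs are below) =====
def Claim_equal_evenness : Prop := ∀ (l : List Int) (n : Int), Dom_evenness l n → Pre_evenness l n → Spec_evenness l n (evenness l n)

-- ===== LEMMAS AND PROOFS =====

theorem oddB_eq_not_evenA (l : List Int) (i : Int) : oddB l i = !(evenA l i) := by
  simp [oddB, evenA, bne]

theorem getLastD_cons (a d : Int) (t : List Int) :
    ((a :: t).getLast?).getD d = (t.getLast?).getD a := by
  induction t generalizing a d with
  | nil => rfl
  | cons b t ih => rw [List.getLast?_cons_cons, ih b d, ih b a]

theorem foldA_inv (l : List Int) (rs : List Int) (x y ce co : Int) :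
    rs.foldl (stepA l) (x, y, ce, co) =
      ( ((rs.filter (fun i => evenA l i)).getLast?).getD x,
        ((rs.filter (fun i => !(evenA l i))).getLast?).getD y,
        ce + (rs.filter (fun i => evenA l i)).length,
        co + (rs.filter (fun i => !(evenA l i))).length ) := by
  induction rs generalizing x y ce co with
  | nil => simp
  | cons i t ih =>
    by_cases h : evenA l i = true
    · simp [List.foldl_cons, stepA, h, ih, getLastD_cons]
      omega
    · simp at h
      simp [List.foldl_cons, stepA, h, ih, getLastD_cons]
      omega

-- find? p l is the head of the filtered list
theorem find?_eq_head_filter {α : Type} (p : α → Bool) (l : List α) :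
    l.find? p = (l.filter p).head? := by
  induction l with
  | nil => rfl
  | cons a t ih =>
    by_cases h : p a = true
    · rw [List.find?_cons_of_pos h, List.filter_cons_of_pos h, List.head?_cons]
    · rw [List.find?_cons_of_neg h, List.filter_cons_of_neg h, ih]

theorem evenness_eq_alt (l : List Int) (n : Int) : evenness l n = evenness_alt l n := by
  unfold evenness evenness_alt
  simp only []
  rw [foldA_inv]
  have hodd : oddB l = fun i => !(evenA l i) := funext (oddB_eq_not_evenA l)
  have hrev : PySem.List.pyRange (n - 1) (-1) (-1) = (PySem.List.pyRange 0 n 1).reverse := by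
    rw [PySem.List.pyRange_neg_one_eq_reverse]; norm_num
  rw [hodd, hrev]
  rw [find?_eq_head_filter, find?_eq_head_filter, List.filter_reverse, List.head?_reverse]
  simp only [List.countP_eq_length_filter]
  by_cases h1 : (List.filter (fun i => !evenA l i) (PySem.List.pyRange 0 n 1)).length = 1
  · obtain ⟨a, ha⟩ := List.length_eq_one_iff.mp h1
    simp [ha]
  · have h1' : ((0 : Int) + ((List.filter (fun i => !evenA l i) (PySem.List.pyRange 0 n 1)).length : Int) == 1) = false := by
      simp; omega
    have h1'' : (((List.filter (fun i => !evenA l i) (PySem.List.pyRange 0 n 1)).length : Int) == 1) = false := by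
      simp; omega
    rw [h1', h1'']
    simp only [if_false, Bool.false_eq_true]
    cases hE : (List.filter (fun i => evenA l i) (PySem.List.pyRange 0 n 1)).getLast? <;> simp [hE]

-- ===== VERDICT (by name: the statement is the Claim_ definition above) =====
theorem evenness_spec : Claim_equal_evenness := by
  intro l n _ _
  unfold Spec_evenness
  exact evenness_eq_alt l n
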